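-- pv_equiv track=rewrite | github.com/cli-labv/cli-skills | cli-progress/examples/03_real_world.py | simulate_download
-- ===== SOURCE A (Python) =====
-- def simulate_download(total_bytes=1024*1024):
--     """Simulate file download with chunks."""
--     chunk_size = 8192
--     chunks = []
--     bytes_transferred = 0
--
--     while bytes_transferred < total_bytes:
--         chunk = min(chunk_size, total_bytes - bytes_transferred)
--         chunks.append(chunk)
--         bytes_transferred += chunk
--
--     return chunks
-- ===== SOURCE B (Python) =====
-- def simulate_download(total_bytes=1024*1024):
--     """Simulate file download with chunks (closed form)."""
--     chunk_size = 8192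
--     if total_bytes <= 0:
--         return []
--     q, r = divmod(total_bytes, chunk_size)
--     return [chunk_size] * q + ([r] if r else [])
-- ===== Notes on version B (the rewrite author's own statement) =====
-- stated objective: simpler
-- what changed: Replaced the accumulate-and-subtract while loop with a closed-form divmod: q full chunks plus an optional remainder chunk.
import Mathlib
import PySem

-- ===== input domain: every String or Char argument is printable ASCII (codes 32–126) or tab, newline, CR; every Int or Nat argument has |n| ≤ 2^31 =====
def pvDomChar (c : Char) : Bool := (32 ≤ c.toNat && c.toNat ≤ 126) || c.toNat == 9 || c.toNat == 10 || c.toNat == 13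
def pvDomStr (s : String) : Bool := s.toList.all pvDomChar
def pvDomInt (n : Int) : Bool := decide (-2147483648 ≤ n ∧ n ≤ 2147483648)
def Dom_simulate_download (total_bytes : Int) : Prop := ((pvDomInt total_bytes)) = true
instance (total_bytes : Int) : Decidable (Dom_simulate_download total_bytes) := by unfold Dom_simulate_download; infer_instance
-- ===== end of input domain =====

-- B replaces A's accumulate-and-subtract while loop with one closed-form divmod; return values proved equal.

-- ===== PORT A =====
-- the while loop: state = (bytes_transferred, chunks accumulator); fuel is only a
-- totality guard (each iteration transfers ≥ 1 byte, so total_bytes.toNat + 1 always suffices)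
def simDownLoop (fuel : Nat) (total_bytes bytes_transferred : Int) (chunks : List Int) : List Int :=
  match fuel with
  | 0 => chunks
  | fuel + 1 =>
    if bytes_transferred < total_bytes then
      let chunk := min 8192 (total_bytes - bytes_transferred)
      simDownLoop fuel total_bytes (bytes_transferred + chunk) (chunks ++ [chunk])
    else chunks

def simulate_download (total_bytes : Int) : List Int :=
  simDownLoop (total_bytes.toNat + 1) total_bytes 0 []

-- ===== PORT B =====
def simulate_download_alt (total_bytes : Int) : List Int :=
  if total_bytes ≤ 0 then []
  else
    let q := PySem.Int.floordiv total_bytes 8192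
    let r := PySem.Int.mod total_bytes 8192
    List.replicate q.toNat 8192 ++ (if r ≠ 0 then [r] else [])

-- ===== PRECONDITION & SPEC =====
def Spec_simulate_download (total_bytes : Int) (out : List Int) : Prop := out = simulate_download_alt total_bytes
instance (total_bytes : Int) (out : List Int) : Decidable (Spec_simulate_download total_bytes out) := by unfold Spec_simulate_download; infer_instance

-- ===== CLAIM (what is proved, stated in full; the proofs are below) =====
def Claim_equal_simulate_download : Prop := ∀ (total_bytes : Int), Dom_simulate_download total_bytes → Spec_simulate_download total_bytes (simulate_download total_bytes)

-- ===== LEMMAS AND PROOFS =====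

theorem alt_last (r : Int) (h0 : 0 < r) (hle : r ≤ 8192) : simulate_download_alt r = [r] := by
  simp only [simulate_download_alt]
  rw [if_neg (by omega)]
  rcases eq_or_lt_of_le hle with heq | hlt
  · subst heq; decide
  · have hq : PySem.Int.floordiv r 8192 = 0 := by
      rw [PySem.Int.floordiv_eq_iff_of_pos (by norm_num)]
      constructor <;> omega
    have hm : PySem.Int.mod r 8192 = r := by
      have := PySem.Int.floordiv_mul_add_mod r 8192
      omega
    rw [hq, hm, if_pos (by omega)]
    simp

theorem alt_step (r : Int) (h : 8192 < r) :
    simulate_download_alt r = 8192 :: simulate_download_alt (r - 8192) := by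
  have hb1 : (0:Int) ≤ PySem.Int.mod (r - 8192) 8192 := PySem.Int.mod_nonneg _ (by norm_num)
  have hb2 : PySem.Int.mod (r - 8192) 8192 < 8192 := PySem.Int.mod_lt _ (by norm_num)
  have ha := PySem.Int.floordiv_mul_add_mod (r - 8192) 8192
  have hq : PySem.Int.floordiv r 8192 = PySem.Int.floordiv (r - 8192) 8192 + 1 := by
    rw [PySem.Int.floordiv_eq_iff_of_pos (by norm_num)]
    constructor <;> nlinarith
  have hm : PySem.Int.mod r 8192 = PySem.Int.mod (r - 8192) 8192 := by
    have hc := PySem.Int.floordiv_mul_add_mod r 8192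
    rw [hq] at hc
    omega
  have hq0 : 0 ≤ PySem.Int.floordiv (r - 8192) 8192 := by nlinarith
  simp only [simulate_download_alt]
  rw [if_neg (show ¬ r ≤ 0 by omega), if_neg (show ¬ r - 8192 ≤ 0 by omega), hq, hm]
  have ht : (PySem.Int.floordiv (r - 8192) 8192 + 1).toNat
      = (PySem.Int.floordiv (r - 8192) 8192).toNat + 1 := by omega
  rw [ht, List.replicate_succ]
  simp

theorem alt_nonpos (r : Int) (h : r ≤ 0) : simulate_download_alt r = [] := by
  simp only [simulate_download_alt]
  rw [if_pos h]

-- loop invariant: with enough fuel the loop appends B's chunk list for the remaining byte count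
theorem simDownLoop_eq (fuel : Nat) (total_bytes bytes_transferred : Int) (chunks : List Int)
    (hn : (total_bytes - bytes_transferred).toNat < fuel) :
    simDownLoop fuel total_bytes bytes_transferred chunks =
      chunks ++ simulate_download_alt (total_bytes - bytes_transferred) := by
  induction fuel generalizing bytes_transferred chunks with
  | zero => omega
  | succ fuel ih =>
    rw [simDownLoop]
    by_cases h : bytes_transferred < total_bytes
    · rw [if_pos h]
      by_cases hle : total_bytes - bytes_transferred ≤ 8192
      · -- last iteration: chunk = remaining, loop terminates next round
        have hmin : min (8192:Int) (total_bytes - bytes_transferred) = total_bytes - bytes_transferred := by omega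
        rw [hmin, ih _ _ (by omega), alt_nonpos (total_bytes - (bytes_transferred + (total_bytes - bytes_transferred))) (by omega),
            alt_last _ (by omega) hle]
        simp
      · -- full chunk of 8192, recurse
        have hmin : min (8192:Int) (total_bytes - bytes_transferred) = 8192 := by omega
        rw [hmin, ih _ _ (by omega), List.append_assoc]
        congr 1
        have hr8 : total_bytes - (bytes_transferred + 8192) = total_bytes - bytes_transferred - 8192 := by omega
        rw [alt_step (total_bytes - bytes_transferred) (by omega), hr8]
        rfl
    · rw [if_neg h, alt_nonpos _ (by omega)]
      simp

-- ===== VERDICT (by name: the statement is the Claim_ definition above) =====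
theorem simulate_download_spec : Claim_equal_simulate_download := by
  intro total_bytes _
  unfold Spec_simulate_download simulate_download
  rw [simDownLoop_eq (total_bytes.toNat + 1) total_bytes 0 [] (by omega)]
  simp
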